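-- pv_equiv track=rewrite | github.com/estraviz/codewars | 7_kyu/Aerial Firefighting/waterbombs.py | waterbombs
-- ===== SOURCE A (Python) =====
-- BUILDING = 'Y'
--
-- def waterbombs(fire, w):
--     """Function that returns the minimum required waterbombs to extinguish the
--        fires in the array"""
--     num_waterbombs = 0
--     for item in filter(None, fire.split(BUILDING)):
--         if len(item) < w:
--             num_waterbombs += 1
--         else:
--             num_waterbombs += len(item) // w + (1 if len(item) % w > 0 else 0)
--     return num_waterbombs
-- ===== SOURCE B (Python) =====
-- def waterbombs(fire, w):
--     """Greedy single pass: count uncovered burning cells in `run`; a bomb is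
--     dropped whenever the run fills a width-w window or the run is cut off by a
--     building / the end of the street."""
--     total = 0
--     run = 0
--     for c in fire:
--         if c == 'Y':
--             if run > 0:
--                 total += 1
--                 run = 0
--         else:
--             run += 1
--             if run == w:
--                 total += 1
--                 run = 0
--     if run > 0:
--         total += 1
--     return total
-- ===== Notes on version B (the rewrite author's own statement) =====
-- stated objective: alternative
-- what changed: B replaces A's split-on-'Y' + per-segment ceiling arithmetic by a single character-by-character greedy pass that keeps a run counter of uncovered burning cells and drops a bomb whenever the run fills a width-w window or is cut off, never materialising the segment list.
-- outside the precondition, e.g. on waterbombs('xxx', -2): A returns -2, B returns 1; on waterbombs('xx', 0): A raises ZeroDivisionError, B returns 1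
import Mathlib
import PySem

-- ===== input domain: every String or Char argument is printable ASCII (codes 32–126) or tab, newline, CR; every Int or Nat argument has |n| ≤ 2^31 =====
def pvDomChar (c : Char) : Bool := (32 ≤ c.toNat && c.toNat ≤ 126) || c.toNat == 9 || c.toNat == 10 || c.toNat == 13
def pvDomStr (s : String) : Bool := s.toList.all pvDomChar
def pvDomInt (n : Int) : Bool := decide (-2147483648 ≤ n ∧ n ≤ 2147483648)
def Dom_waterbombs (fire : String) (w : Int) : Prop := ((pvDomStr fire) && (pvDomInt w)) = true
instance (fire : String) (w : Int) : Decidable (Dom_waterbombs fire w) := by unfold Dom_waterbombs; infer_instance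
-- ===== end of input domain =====

-- B replaces the split-into-segments + ceil-per-segment computation by a single greedy
-- character-by-character pass with a run counter (objective: simpler decomposition, same cost).

-- ===== PORT A =====
-- A: split on 'Y', drop empty segments, add ceil(len/w) per segment (written as in the Python).
def waterbombs (fire : String) (w : Int) : Int :=
  ((PySem.Chars.splitOn fire.toList ['Y']).filter (fun item => !item.isEmpty)).foldl
    (fun num_waterbombs item =>
      if (item.length : Int) < w then num_waterbombs + 1
      else num_waterbombs + PySem.Int.floordiv (item.length : Int) w +
             (if PySem.Int.mod (item.length : Int) w > 0 then 1 else 0)) 0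

-- ===== PORT B =====
-- B: one pass, state (total, run); a bomb when the run reaches w or is cut off.
def waterbombs_alt (fire : String) (w : Int) : Int :=
  let st := fire.toList.foldl
    (fun (p : Int × Int) c =>
      if c = 'Y' then (if p.2 > 0 then (p.1 + 1, 0) else p)
      else
        let run := p.2 + 1
        if run = w then (p.1 + 1, 0) else (p.1, run)) ((0 : Int), (0 : Int))
  if st.2 > 0 then st.1 + 1 else st.1

-- ===== PRECONDITION & SPEC =====
-- Pre_ excludes non-positive bomb widths w: for w = 0 A raises ZeroDivisionError on any
-- string with a burning cell, and for w < 0 A's floor division yields meaningless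
-- negative bomb counts (an artefact no caller of this Codewars kata can want);
-- a bomb width is naturally a positive integer.
def Pre_waterbombs (fire : String) (w : Int) : Prop := 1 ≤ w
instance (fire : String) (w : Int) : Decidable (Pre_waterbombs fire w) := by
  unfold Pre_waterbombs; infer_instance
def pvWitness_waterbombs : String × Int := ("xxYxx", 2)
def Spec_waterbombs (fire : String) (w : Int) (out : Int) : Prop := out = waterbombs_alt fire w
instance (fire : String) (w : Int) (out : Int) : Decidable (Spec_waterbombs fire w out) := by
  unfold Spec_waterbombs; infer_instance

-- ===== CLAIM (what is proved, stated in full; the proofs are below) =====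
def Claim_equal_waterbombs : Prop := ∀ (fire : String) (w : Int), Dom_waterbombs fire w → Pre_waterbombs fire w → Spec_waterbombs fire w (waterbombs fire w)

-- ===== LEMMAS AND PROOFS =====

-- the segments of the street between buildings, as A's split produces them
def segs : List Char → List (List Char)
  | [] => [[]]
  | c :: t => if c = 'Y' then [] :: segs t
              else match segs t with
                   | [] => [[c]]
                   | s :: ss => (c :: s) :: ss

def consHead (p : List Char) : List (List Char) → List (List Char)
  | [] => [p]
  | s :: ss => (p ++ s) :: ss

-- ceil(n / W) for W ≥ 1, written as A computes it
def ceilI (W n : Nat) : Int := ((n / W : Nat) : Int) + (if n % W = 0 then 0 else 1)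

def asum (W : Nat) (xs : List (List Char)) : Int := (xs.map (fun s => ceilI W s.length)).sum

-- bombs B still drops given a pending run of r uncovered cells followed by l
def G (W : Nat) : List Char → Nat → Int
  | [], r => if 0 < r then 1 else 0
  | c :: l, r =>
      if c = 'Y' then (if 0 < r then 1 else 0) + G W l 0
      else if r + 1 = W then 1 + G W l 0 else G W l (r + 1)

lemma segs_ne_nil (l : List Char) : segs l ≠ [] := by
  cases l with
  | nil => simp [segs]
  | cons c t =>
    simp only [segs]
    split
    · simp
    · split <;> simp

lemma consHead_nil (xs : List (List Char)) (h : xs ≠ []) : consHead [] xs = xs := by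
  cases xs with
  | nil => exact absurd rfl h
  | cons s ss => simp [consHead]

lemma go_eq : ∀ (fuel : Nat) (l cur : List Char) (accs : List (List Char)),
    l.length < fuel →
    PySem.Chars.splitOn.go ['Y'] fuel l cur accs = accs.reverse ++ consHead cur.reverse (segs l) := by
  intro fuel
  induction fuel with
  | zero => intro l cur accs h; omega
  | succ f ih =>
    intro l cur accs h
    match l with
    | [] => simp [PySem.Chars.splitOn.go, segs, consHead]
    | c :: rest =>
      rw [PySem.Chars.splitOn.go]
      by_cases hc : c = 'Y'
      · subst hc
        simp only [List.isPrefixOf, BEq.rfl, Bool.true_and, if_pos, List.length_singleton,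
          List.drop_succ_cons, List.drop_zero]
        rw [ih rest [] (cur.reverse :: accs) (by simpa using Nat.lt_of_succ_lt_succ h)]
        simp only [segs, if_pos, consHead, List.reverse_cons, List.append_assoc,
          List.cons_append, List.nil_append, List.append_nil]
        cases hs : segs rest with
        | nil => exact absurd hs (segs_ne_nil rest)
        | cons s ss => rfl
      · have : (['Y'].isPrefixOf (c :: rest)) = false := by
          simp [List.isPrefixOf]
          intro hh; exact absurd hh.symm hc
        rw [this]
        simp only [Bool.false_eq_true, if_neg, not_false_iff]
        rw [ih rest (c :: cur) accs (by simpa using Nat.lt_of_succ_lt_succ h)]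
        cases hs : segs rest with
        | nil => exact absurd hs (segs_ne_nil rest)
        | cons s ss => simp [segs, hc, hs, consHead]

lemma splitOn_Y (l : List Char) : PySem.Chars.splitOn l ['Y'] = segs l := by
  rw [PySem.Chars.splitOn]
  rw [go_eq (l.length + 1) l [] [] (by omega)]
  simp [consHead_nil _ (segs_ne_nil l)]

lemma ceilI_lt (W r : Nat) (hW : 1 ≤ W) (hr : r < W) :
    ceilI W r = if 0 < r then 1 else 0 := by
  unfold ceilI
  rw [Nat.div_eq_of_lt hr, Nat.mod_eq_of_lt hr]
  rcases Nat.eq_zero_or_pos r with h | h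
  · simp [h]
  · rw [if_neg (by omega), if_pos h]
    rfl

lemma ceilI_add_W (W n : Nat) (hW : 1 ≤ W) : ceilI W (W + n) = 1 + ceilI W n := by
  unfold ceilI
  rw [Nat.add_comm W n, Nat.add_div_right _ (by omega), Nat.add_mod_right]
  push_cast
  ring

-- B's fold step, named for the proofs (definitionally the lambda of waterbombs_alt)
def bstep (W : Nat) : Int × Int → Char → Int × Int := fun p c =>
  if c = 'Y' then (if p.2 > 0 then (p.1 + 1, 0) else p)
  else
    let run := p.2 + 1
    if run = (W : Int) then (p.1 + 1, 0) else (p.1, run)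

-- B's fold, started with pending run r < W, adds exactly G W l r to the total
lemma B_fold (W : Nat) (hW : 1 ≤ W) :
    ∀ (l : List Char) (t : Int) (r : Nat), r < W →
    (if (l.foldl (bstep W) (t, (r : Nat))).2 > 0
     then (l.foldl (bstep W) (t, (r : Nat))).1 + 1
     else (l.foldl (bstep W) (t, (r : Nat))).1) = t + G W l r := by
  intro l
  induction l with
  | nil =>
    intro t r hr
    simp only [List.foldl_nil, G]
    split_ifs with h1 h2 h2 <;> push_cast at * <;> omega
  | cons c l ih =>
    intro t r hr
    simp only [List.foldl_cons, G]
    by_cases hc : c = 'Y'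
    · subst hc
      rw [show bstep W (t, ((r : Nat) : Int)) 'Y'
            = (if ((r : Nat) : Int) > 0 then (t + 1, (0 : Int)) else (t, ((r : Nat) : Int))) from by
          simp [bstep], if_pos rfl]
      rcases Nat.eq_zero_or_pos r with h0 | h0
      · subst h0
        have H := ih t 0 hW
        simp only [Nat.cast_zero] at H ⊢
        rw [if_neg (by omega : ¬ ((0:Int) > 0)), if_neg (by omega : ¬ (0 < 0)), H]
        ring
      · have H := ih (t + 1) 0 hW
        simp only [Nat.cast_zero] at H ⊢
        rw [if_pos (by exact_mod_cast h0 : ((r:Nat):Int) > 0), if_pos h0, H]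
        ring
    · rw [show bstep W (t, ((r : Nat) : Int)) c
            = (if ((r : Nat) : Int) + 1 = (W : Int) then (t + 1, (0 : Int))
               else (t, ((r : Nat) : Int) + 1)) from by simp [bstep, hc], if_neg hc]
      by_cases hrw : r + 1 = W
      · have H := ih (t + 1) 0 hW
        simp only [Nat.cast_zero] at H ⊢
        rw [if_pos (by exact_mod_cast hrw : ((r:Nat):Int) + 1 = (W:Int)), if_pos hrw, H]
        ring
      · have H := ih t (r + 1) (by omega)
        rw [if_neg (show ¬ (((r : Nat) : Int) + 1 = (W : Int)) from
              fun h => hrw (by exact_mod_cast h)), if_neg hrw,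
            show ((r : Nat) : Int) + 1 = (((r + 1 : Nat)) : Int) from by push_cast; ring, H]

-- G counts ceil over segments: the pending run merges into the first segment
lemma G_segs (W : Nat) (hW : 1 ≤ W) :
    ∀ (l : List Char) (r : Nat), r < W →
    G W l r = ceilI W (r + (segs l).headI.length) + asum W (segs l).tail := by
  intro l
  induction l with
  | nil =>
    intro r hr
    simp only [G, segs, List.headI, List.length_nil, Nat.add_zero, List.tail, asum,
      List.map_nil, List.sum_nil, Int.add_zero]
    rw [ceilI_lt W r hW hr]
  | cons c l ih =>
    intro r hr
    by_cases hc : c = 'Y'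
    · subst hc
      have hseg : segs ('Y' :: l) = [] :: segs l := by simp [segs]
      rw [hseg]
      cases hs : segs l with
      | nil => exact absurd hs (segs_ne_nil l)
      | cons s ss =>
        simp only [G, List.headI, List.length_nil, Nat.add_zero, List.tail]
        rw [ih 0 hW, hs, ceilI_lt W r hW hr]
        simp only [List.headI, List.tail, asum, List.map_cons, List.sum_cons, Nat.zero_add,
          if_true]
    · cases hs : segs l with
      | nil => exact absurd hs (segs_ne_nil l)
      | cons s ss =>
        have hseg : segs (c :: l) = (c :: s) :: ss := by
          simp [segs, hc, hs]
        rw [hseg]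
        simp only [G, if_neg hc, List.headI, List.tail, List.length_cons]
        by_cases hrw : r + 1 = W
        · rw [if_pos hrw, ih 0 hW, hs]
          simp only [List.headI, List.tail, Nat.zero_add]
          have : r + (s.length + 1) = W + s.length := by omega
          rw [this, ceilI_add_W W s.length hW]
          ring
        · rw [if_neg hrw, ih (r + 1) (by omega), hs]
          simp only [List.headI, List.tail]
          have : r + (s.length + 1) = (r + 1) + s.length := by omega
          rw [this]

-- A's per-segment value is ceil(len/W) on a nonempty segment
lemma valA_eq (W : Nat) (hW : 1 ≤ W) (s : List Char) (hs : s ≠ []) :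
    (if ((s.length : Nat) : Int) < (W : Int) then (1 : Int)
     else PySem.Int.floordiv (s.length : Int) (W : Int) +
            (if PySem.Int.mod (s.length : Int) (W : Int) > 0 then 1 else 0)) = ceilI W s.length := by
  have hlen : 1 ≤ s.length := List.length_pos_iff.mpr hs
  by_cases h : s.length < W
  · rw [if_pos (by exact_mod_cast h), ceilI_lt W s.length hW h, if_pos (by omega)]
  · rw [if_neg (by exact_mod_cast h)]
    unfold ceilI
    rw [PySem.Int.floordiv_natCast, PySem.Int.mod_natCast]
    congr 1
    by_cases hm : s.length % W = 0
    · simp [hm]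
    · rw [if_pos (by exact_mod_cast Nat.pos_of_ne_zero hm), if_neg hm]

-- A's fold over the filtered segments sums ceil over ALL segments (empties count 0)
lemma A_fold (W : Nat) (hW : 1 ≤ W) :
    ∀ (xs : List (List Char)) (t : Int),
    ((xs.filter (fun item => !item.isEmpty)).foldl
      (fun num_waterbombs item =>
        if (item.length : Int) < (W : Int) then num_waterbombs + 1
        else num_waterbombs + PySem.Int.floordiv (item.length : Int) (W : Int) +
               (if PySem.Int.mod (item.length : Int) (W : Int) > 0 then 1 else 0)) t)
      = t + asum W xs := by
  intro xs
  induction xs with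
  | nil => intro t; simp [asum]
  | cons s ss ih =>
    intro t
    by_cases hs : s = []
    · subst hs
      rw [List.filter_cons_of_neg (by simp), ih t]
      have : ceilI W 0 = 0 := by simp [ceilI]
      simp [asum, this]
    · rw [List.filter_cons_of_pos (by simpa using hs), List.foldl_cons, ih]
      have hv := valA_eq W hW s hs
      simp only [asum, List.map_cons, List.sum_cons, ← hv]
      split_ifs <;> ring

-- ===== VERDICT (by name: the statement is the Claim_ definition above) =====
theorem waterbombs_spec : Claim_equal_waterbombs := by
  intro fire w _ hpre
  unfold Spec_waterbombs
  have hw : 1 ≤ w := hpre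
  obtain ⟨W, rfl⟩ : ∃ W : Nat, w = (W : Int) :=
    ⟨w.toNat, (Int.toNat_of_nonneg (by omega)).symm⟩
  have hW : 1 ≤ W := by exact_mod_cast hw
  have hA : waterbombs fire (W : Int) = asum W (segs fire.toList) := by
    rw [waterbombs, splitOn_Y]
    simpa using A_fold W hW (segs fire.toList) 0
  have hBdef : waterbombs_alt fire (W : Int)
      = (if ((fire.toList.foldl (bstep W) ((0 : Int), ((0 : Nat) : Int))).2 > 0)
         then (fire.toList.foldl (bstep W) ((0 : Int), ((0 : Nat) : Int))).1 + 1
         else (fire.toList.foldl (bstep W) ((0 : Int), ((0 : Nat) : Int))).1) := rfl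
  have hB : waterbombs_alt fire (W : Int) = G W fire.toList 0 := by
    rw [hBdef, B_fold W hW fire.toList 0 0 hW]
    ring
  rw [hA, hB, G_segs W hW fire.toList 0 hW]
  cases hs : segs fire.toList with
  | nil => exact absurd hs (segs_ne_nil fire.toList)
  | cons s ss =>
    simp only [List.headI, List.tail, asum, List.map_cons, List.sum_cons, Nat.zero_add]
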